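-- pv_equiv track=rewrite | github.com/Howen827/Lab1-Penuela-Gonzalez | lfa.py | verificar_formato
-- ===== SOURCE A (Python) =====
-- def verificar_formato(w):
--     """Verifica que la cadena tenga el formato a^k b^s a^m"""
--     # Verificar que la cadena solo contiene 'a's y 'b's
--     if not all(c in {'a', 'b'} for c in w):
--         return False, 0, 0
--
--     # Contar las 'a's iniciales (k)
--     k = 0
--     while k < len(w) and w[k] == 'a':
--         k += 1
--
--     # Contar las 'b's siguientes (s)
--     s = 0
--     while k + s < len(w) and w[k + s] == 'b':
--         s += 1
--
--     # Verificar que el resto son 'a's (m)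
--     m = len(w) - k - s
--     if not all(c == 'a' for c in w[k+s:]):
--         return False, 0, 0
--
--     return True, k, s
-- ===== SOURCE B (Python) =====
-- def verificar_formato(w):
--     """Verifica que la cadena tenga el formato a^k b^s a^m (DFA de un solo paso)"""
--     state = 0  # 0: a's iniciales, 1: b's, 2: a's finales
--     k = s = 0
--     for c in w:
--         if c == 'a':
--             if state == 0:
--                 k += 1
--             else:
--                 state = 2
--         elif c == 'b':
--             if state == 2:
--                 return False, 0, 0
--             state = 1
--             s += 1
--         else:
--             return False, 0, 0
--     return True, k, s
-- ===== Notes on version B (the rewrite author's own statement) =====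
-- stated objective: alternative
-- what changed: Replaces A's alphabet pre-check, two index-based while loops and a tail slice scan with a single forward pass driven by a 3-state finite automaton that counts k and s as it goes and rejects early when the run order is violated or a foreign character appears.
import Mathlib
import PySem

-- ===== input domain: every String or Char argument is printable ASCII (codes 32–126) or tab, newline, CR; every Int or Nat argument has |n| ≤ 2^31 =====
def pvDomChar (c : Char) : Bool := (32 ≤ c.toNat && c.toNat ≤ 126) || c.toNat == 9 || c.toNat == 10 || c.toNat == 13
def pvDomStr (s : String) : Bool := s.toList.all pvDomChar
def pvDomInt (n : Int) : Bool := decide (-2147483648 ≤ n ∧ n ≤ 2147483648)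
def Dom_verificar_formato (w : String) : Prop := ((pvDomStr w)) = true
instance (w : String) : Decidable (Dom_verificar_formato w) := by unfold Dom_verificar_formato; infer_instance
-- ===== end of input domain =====

-- B replaces A's staged scans (alphabet pre-check, two while loops, tail scan) by one
-- single-pass 3-state finite automaton that counts k and s on the fly (alternative, same cost).

-- ===== PORT A =====
-- 'while i < len(w) and w[i] == c: i += 1' — literal port of each counting loop
def pvWhileRun (c : Char) (l : List Char) (i : Nat) : Nat :=
  if h : i < l.length then
    if l[i] = c then pvWhileRun c l (i+1) else i
  else i
termination_by l.length - i

def verificar_formato (w : String) : Bool × Int × Int :=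
  let l := w.toList
  if ¬ (l.all (fun c => c == 'a' || c == 'b')) then (false, 0, 0)
  else
    let k := pvWhileRun 'a' l 0
    let ks := pvWhileRun 'b' l k          -- k + s
    -- w[k+s:] with 0 ≤ k+s ported as l.drop ks — exact for a nonnegative start
    if ¬ ((l.drop ks).all (fun c => c == 'a')) then (false, 0, 0)
    else (true, (k : Int), ((ks : Int) - (k : Int)))

-- ===== PORT B =====
-- the 'for c in w' loop with early returns, ported as structural recursion over the chars,
-- carrying the DFA state (0 = leading a's, 1 = b's, 2 = trailing a's) and the counters k, s
def vfAux (l : List Char) (st : Nat) (k : Nat) (s : Nat) : Bool × Int × Int :=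
  match l with
  | [] => (true, (k : Int), (s : Int))
  | c :: rest =>
    if c = 'a' then
      if st = 0 then vfAux rest 0 (k+1) s
      else vfAux rest 2 k s
    else if c = 'b' then
      if st = 2 then (false, 0, 0)
      else vfAux rest 1 k (s+1)
    else (false, 0, 0)

def verificar_formato_alt (w : String) : Bool × Int × Int := vfAux w.toList 0 0 0

-- ===== PRECONDITION & SPEC =====
def Spec_verificar_formato (w : String) (out : Bool × Int × Int) : Prop := out = verificar_formato_alt w
instance (w : String) (out : Bool × Int × Int) : Decidable (Spec_verificar_formato w out) := by unfold Spec_verificar_formato; infer_instance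

-- ===== CLAIM (what is proved, stated in full; the proofs are below) =====
def Claim_equal_verificar_formato : Prop := ∀ (w : String), Dom_verificar_formato w → Spec_verificar_formato w (verificar_formato w)

-- ===== LEMMAS AND PROOFS =====

theorem pvWhileRun_eq (c : Char) (l : List Char) (i : Nat) :
    pvWhileRun c l i = i + ((l.drop i).takeWhile (· == c)).length := by
  fun_induction pvWhileRun c l i with
  | case1 i h hc ih =>
    rw [ih, List.drop_eq_getElem_cons h]
    simp [hc]
    omega
  | case2 i h hc =>
    rw [List.drop_eq_getElem_cons h]
    simp [hc]
  | case3 i h =>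
    rw [List.drop_eq_nil_iff.mpr (by omega)]
    simp

theorem drop_length_takeWhile (p : Char → Bool) (l : List Char) :
    l.drop (l.takeWhile p).length = l.dropWhile p := by
  induction l with
  | nil => simp
  | cons a as ih =>
    by_cases hp : p a
    · simpa [hp] using ih
    · simp [hp]

theorem mem_dropWhile_of_neg {p : Char → Bool} {l : List Char} {x : Char}
    (hx : x ∈ l) (hpx : p x = false) : x ∈ l.dropWhile p := by
  induction l with
  | nil => cases hx
  | cons a as ih =>
    simp only [List.dropWhile]
    rcases List.mem_cons.mp hx with rfl | hmem
    · simp [hpx]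
    · split
      · exact ih hmem
      · exact List.mem_cons_of_mem _ hmem

-- DFA state 2: the remaining input must be all 'a'
theorem vfAux_state2 (l : List Char) (k s : Nat) :
    vfAux l 2 k s = if l.all (· == 'a') then (true, (k : Int), (s : Int)) else (false, 0, 0) := by
  induction l with
  | nil => simp [vfAux]
  | cons c rest ih =>
    by_cases hc : c = 'a'
    · simp [vfAux, hc, ih]
    · by_cases hb : c = 'b' <;> simp [vfAux, hc, hb]

-- DFA state 1: count the b-run, then the rest must be all 'a'
theorem vfAux_state1 (l : List Char) (k s : Nat) :
    vfAux l 1 k s =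
      if (l.dropWhile (· == 'b')).all (· == 'a')
      then (true, (k : Int), (s : Int) + ((l.takeWhile (· == 'b')).length : Int))
      else (false, 0, 0) := by
  induction l generalizing s with
  | nil => simp [vfAux]
  | cons c rest ih =>
    by_cases hc : c = 'a'
    · simp only [vfAux, hc, reduceIte, vfAux_state2]
      simp
    · by_cases hb : c = 'b'
      · simp only [vfAux, hc, hb, reduceIte, ih]
        simp [hb, hc]
        split <;> simp <;> push_cast <;> ring
      · simp [vfAux, hc, hb]

-- DFA state 0: count the a-run, the b-run, then the rest must be all 'a'
theorem vfAux_state0 (l : List Char) (k s : Nat) :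
    vfAux l 0 k s =
      if ((l.dropWhile (· == 'a')).dropWhile (· == 'b')).all (· == 'a')
      then (true, (k : Int) + ((l.takeWhile (· == 'a')).length : Int),
            (s : Int) + (((l.dropWhile (· == 'a')).takeWhile (· == 'b')).length : Int))
      else (false, 0, 0) := by
  induction l generalizing k with
  | nil => simp [vfAux]
  | cons c rest ih =>
    by_cases hc : c = 'a'
    · simp only [vfAux, hc, if_pos rfl]
      rw [ih]
      simp [hc]
      split <;> simp <;> push_cast <;> ring
    · by_cases hb : c = 'b'
      · simp only [vfAux, hc, hb]
        rw [vfAux_state1]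
        simp [hc, hb]
        split <;> simp <;> push_cast <;> ring
      · simp [vfAux, hc, hb]

-- ===== VERDICT (by name: the statement is the Claim_ definition above) =====
theorem verificar_formato_spec : Claim_equal_verificar_formato := by
  intro w _
  unfold Spec_verificar_formato verificar_formato verificar_formato_alt
  set l := w.toList with hl
  rw [vfAux_state0]
  by_cases hall : l.all (fun c => c == 'a' || c == 'b')
  · simp only [hall, not_true_eq_false, if_false]
    have hk : pvWhileRun 'a' l 0 = (l.takeWhile (· == 'a')).length := by
      simpa using pvWhileRun_eq 'a' l 0
    have ht : l.drop (pvWhileRun 'a' l 0) = l.dropWhile (· == 'a') := by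
      rw [hk]; exact drop_length_takeWhile _ _
    set t := l.dropWhile (· == 'a') with htdef
    have hks : pvWhileRun 'b' l (pvWhileRun 'a' l 0)
        = pvWhileRun 'a' l 0 + (t.takeWhile (· == 'b')).length := by
      rw [pvWhileRun_eq, ht]
    have hu : l.drop (pvWhileRun 'b' l (pvWhileRun 'a' l 0)) = t.dropWhile (· == 'b') := by
      rw [hks, ← drop_length_takeWhile (· == 'b') t, ← ht, List.drop_drop, Nat.add_comm]
    set u := t.dropWhile (· == 'b') with hudef
    by_cases hrest : u.all (· == 'a')
    · rw [hu]
      simp only [hrest, not_true_eq_false, if_false, if_true, Prod.mk.injEq, true_and]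
      constructor
      · rw [hk]; push_cast; ring
      · rw [hks, hk]; push_cast; ring
    · rw [hu]
      simp [hrest]
  · -- some char is neither 'a' nor 'b': B's pass also rejects (the bad char survives both dropWhiles)
    obtain ⟨x, hxl, hxp⟩ := by
      simpa using (List.all_eq_false.mp (Bool.eq_false_iff.mpr hall))
    have hxa : (x == 'a') = false := by
      cases h : x == 'a' <;> simp_all
    have hxb : (x == 'b') = false := by
      cases h : x == 'b' <;> simp_all
    have hxu : x ∈ (l.dropWhile (· == 'a')).dropWhile (· == 'b') :=
      mem_dropWhile_of_neg (mem_dropWhile_of_neg hxl hxa) hxb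
    have hfail : ((l.dropWhile (· == 'a')).dropWhile (· == 'b')).all (· == 'a') = false := by
      apply List.all_eq_false.mpr
      exact ⟨x, hxu, by simp [hxa]⟩
    simp [hall, hfail]
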